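-- pv_equiv track=rewrite | github.com/KostaMalsev/medical2 | trainer/data_generator.py | create_bio_labels
-- ===== SOURCE A (Python) =====
-- from typing import Dict, List, Any, Tuple
--
-- def create_bio_labels(tokens: List[str], value: str, field: str) -> List[str]:
--     """Create BIO scheme labels for tokens."""
--     labels = ["O"] * len(tokens)
--     value_tokens = value.split()
--
--     # Convert to lowercase for case-insensitive matching
--     token_text = " ".join(tokens).lower()
--     value_text = " ".join(value_tokens).lower()
--
--     # Find all occurrences
--     start_idx = 0
--     while True:
--         try:
--             pos = token_text.index(value_text, start_idx)
--             token_start = len(token_text[:pos].split())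
--
--             if token_start < len(tokens):
--                 labels[token_start] = f"B-{field}"
--                 for i in range(token_start + 1, min(token_start + len(value_tokens), len(tokens))):
--                     labels[i] = f"I-{field}"
--
--             start_idx = pos + 1
--         except ValueError:
--             break
--
--     return labels
-- ===== SOURCE B (Python) =====
-- from typing import List
--
--
-- def _apply(labels: List[str], token_start: int, n_value_tokens: int, field: str) -> None:
--     """Mark one match starting at token index token_start."""
--     if token_start < len(labels):
--         labels[token_start] = f"B-{field}"
--         for i in range(token_start + 1, min(token_start + n_value_tokens, len(labels))):
--             labels[i] = f"I-{field}"
--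
--
-- def create_bio_labels(tokens: List[str], value: str, field: str) -> List[str]:
--     """Create BIO scheme labels for tokens."""
--     labels = ["O"] * len(tokens)
--     value_tokens = value.split()
--     token_text = " ".join(tokens).lower()
--     value_text = " ".join(value_tokens).lower()
--
--     # wc[p] = number of whitespace-separated words in token_text[:p], built once up front
--     wc = [0]
--     last = 0
--     prev_space = True
--     for ch in token_text:
--         if prev_space and not ch.isspace():
--             last += 1
--         wc.append(last)
--         prev_space = ch.isspace()
--
--     pos = token_text.find(value_text)
--     while pos != -1:
--         _apply(labels, wc[pos], len(value_tokens), field)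
--         pos = token_text.find(value_text, pos + 1)
--     return labels
-- ===== Notes on version B (the rewrite author's own statement) =====
-- stated objective: alternative
-- what changed: Replaces the per-match len(prefix.split()) rescan with a prefix word-count array built once, so each match position maps to its token index by a single array lookup.
import Mathlib
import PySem

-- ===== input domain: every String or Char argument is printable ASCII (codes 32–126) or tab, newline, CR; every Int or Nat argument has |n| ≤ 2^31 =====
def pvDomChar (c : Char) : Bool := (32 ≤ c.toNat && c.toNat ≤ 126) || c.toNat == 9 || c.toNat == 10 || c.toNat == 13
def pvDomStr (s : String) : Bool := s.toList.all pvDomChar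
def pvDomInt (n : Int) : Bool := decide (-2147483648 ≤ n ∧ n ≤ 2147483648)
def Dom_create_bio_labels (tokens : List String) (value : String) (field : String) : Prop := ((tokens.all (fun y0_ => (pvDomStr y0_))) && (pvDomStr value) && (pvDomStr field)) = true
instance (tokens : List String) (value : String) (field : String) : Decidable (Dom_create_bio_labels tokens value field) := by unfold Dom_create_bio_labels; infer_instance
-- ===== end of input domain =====

-- B replaces A's per-match `len(prefix.split())` rescan by a prefix word-count array
-- built once, each match position then maps to its token index by a single list lookup
-- (objective: alternative; not measured faster).

-- ===== PORT A =====
-- the `while True: pos = token_text.index(value_text, start_idx) …` loop of A;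
-- fuel (len(token_text)+2) only makes the recursion structural — it is never exhausted,
-- since start_idx strictly increases and index raises once it passes the text length
def pvA_loop (tokenText valueText : String) (nTokens nValueTokens : Nat) (field : String) :
    Nat → List String → Int → List String
  | 0, labels, _ => labels
  | fuel + 1, labels, startIdx =>
      let pos := PySem.Str.findFrom tokenText valueText startIdx
      if pos = -1 then labels   -- ValueError: break
      else
        let tokenStart := (PySem.Str.split₀ (PySem.Str.slice tokenText none (some pos))).length
        let labels' :=
          if tokenStart < nTokens then
            let lb := PySem.List.pySetD labels (tokenStart : Int) ("B-" ++ field)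
            (PySem.List.pyRange ((tokenStart : Int) + 1)
                ((min (tokenStart + nValueTokens) nTokens : Nat) : Int) 1).foldl
              (fun l i => PySem.List.pySetD l i ("I-" ++ field)) lb
          else labels
        pvA_loop tokenText valueText nTokens nValueTokens field fuel labels' (pos + 1)

def create_bio_labels (tokens : List String) (value : String) (field : String) : List String :=
  let labels := List.replicate tokens.length "O"
  let valueTokens := PySem.Str.split₀ value
  let tokenText := PySem.Str.lower (PySem.Str.join " " tokens)
  let valueText := PySem.Str.lower (PySem.Str.join " " valueTokens)
  pvA_loop tokenText valueText tokens.length valueTokens.length field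
    (tokenText.toList.length + 2) labels 0

-- ===== PORT B =====
-- Source B: `for ch in token_text: if prev_space and not ch.isspace(): last += 1; wc.append(last); …`
def pvB_wcGo : List Char → Nat → Bool → List Nat → List Nat
  | [], _, _, acc => acc.reverse
  | c :: rest, last, prevSpace, acc =>
      let last' := if prevSpace && !(PySem.Chars.isspace c) then last + 1 else last
      pvB_wcGo rest last' (PySem.Chars.isspace c) (last' :: acc)

-- Source B helper `_apply` (mutates labels in place there; returns the updated list here)
def pvB_apply (labels : List String) (tokenStart nValueTokens : Nat) (field : String) : List String :=
  if tokenStart < labels.length then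
    let lb := PySem.List.pySetD labels (tokenStart : Int) ("B-" ++ field)
    (PySem.List.pyRange ((tokenStart : Int) + 1)
        ((min (tokenStart + nValueTokens) labels.length : Nat) : Int) 1).foldl
      (fun l i => PySem.List.pySetD l i ("I-" ++ field)) lb
  else labels

-- Source B: `while pos != -1: _apply(labels, wc[pos], …); pos = token_text.find(value_text, pos+1)`;
-- fuel as in pvA_loop, never exhausted
def pvB_loop (tokenText valueText field : String) (wc : List Nat) (nValueTokens : Nat) :
    Nat → List String → Int → List String
  | 0, labels, _ => labels
  | fuel + 1, labels, pos =>
      if pos = -1 then labels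
      else
        let labels' := pvB_apply labels (PySem.List.pyGetD wc pos 0) nValueTokens field
        pvB_loop tokenText valueText field wc nValueTokens fuel labels'
          (PySem.Str.findFrom tokenText valueText (pos + 1))

def create_bio_labels_alt (tokens : List String) (value : String) (field : String) : List String :=
  let labels := List.replicate tokens.length "O"
  let valueTokens := PySem.Str.split₀ value
  let tokenText := PySem.Str.lower (PySem.Str.join " " tokens)
  let valueText := PySem.Str.lower (PySem.Str.join " " valueTokens)
  let wc := pvB_wcGo tokenText.toList 0 true [0]
  pvB_loop tokenText valueText field wc valueTokens.length
    (tokenText.toList.length + 2) labels (PySem.Str.find tokenText valueText)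

-- ===== PRECONDITION & SPEC =====
def Spec_create_bio_labels (tokens : List String) (value : String) (field : String) (out : List String) : Prop := out = create_bio_labels_alt tokens value field
instance (tokens : List String) (value : String) (field : String) (out : List String) : Decidable (Spec_create_bio_labels tokens value field out) := by unfold Spec_create_bio_labels; infer_instance

-- ===== CLAIM (what is proved, stated in full; the proofs are below) =====
def Claim_equal_create_bio_labels : Prop := ∀ (tokens : List String) (value : String) (field : String), Dom_create_bio_labels tokens value field → Spec_create_bio_labels tokens value field (create_bio_labels tokens value field)

-- ===== LEMMAS AND PROOFS =====

-- word count of a chunk, given whether we are currently inside a word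
def pvCnt : List Char → Bool → Nat
  | [], inw => if inw then 1 else 0
  | c :: r, inw =>
      if PySem.Chars.isspace c then (if inw then 1 else 0) + pvCnt r false
      else pvCnt r true

-- whether we are inside a word after consuming the chunk
def pvEnd : List Char → Bool → Bool
  | [], inw => inw
  | c :: r, _ => pvEnd r (!PySem.Chars.isspace c)

-- the stream of values appended to wc by Source B's scan
def pvScan : List Char → Nat → Bool → List Nat
  | [], _, _ => []
  | c :: r, last, prev =>
      let last' := if prev && !(PySem.Chars.isspace c) then last + 1 else last
      last' :: pvScan r last' (PySem.Chars.isspace c)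

theorem pvB_wcGo_eq (rest : List Char) : ∀ (last : Nat) (prev : Bool) (acc : List Nat),
    pvB_wcGo rest last prev acc = acc.reverse ++ pvScan rest last prev := by
  induction rest with
  | nil => intro last prev acc; simp [pvB_wcGo, pvScan]
  | cons c r ih => intro last prev acc; simp [pvB_wcGo, pvScan, ih]

theorem pvEnd_append (s : List Char) : ∀ (inw : Bool) (c : Char),
    pvEnd (s ++ [c]) inw = !PySem.Chars.isspace c := by
  induction s with
  | nil => intro inw c; simp [pvEnd]
  | cons x r ih => intro inw c; simp [pvEnd, ih]

theorem pvCnt_append (s : List Char) : ∀ (inw : Bool) (c : Char),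
    pvCnt (s ++ [c]) inw
      = pvCnt s inw + (if pvEnd s inw = false ∧ PySem.Chars.isspace c = false then 1 else 0) := by
  induction s with
  | nil =>
      intro inw c
      by_cases hc : PySem.Chars.isspace c <;> cases inw <;> simp [pvCnt, pvEnd, hc]
  | cons x r ih =>
      intro inw c
      by_cases hx : PySem.Chars.isspace x <;> (simp [pvCnt, pvEnd, hx, ih]; try omega)

-- the scan list, read at index p, is the word count of the whole prefix up to p
theorem pvScan_getD (rest : List Char) : ∀ (p : Nat) (pre : List Char), p ≤ rest.length →
    (pvCnt pre false :: pvScan rest (pvCnt pre false) (!pvEnd pre false)).getD p 0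
      = pvCnt (pre ++ rest.take p) false := by
  induction rest with
  | nil =>
      intro p pre hp
      have : p = 0 := by simpa using hp
      subst this; simp
  | cons c r ih =>
      intro p pre hp
      cases p with
      | zero => simp
      | succ p =>
          have hlast : (if (!pvEnd pre false) && !(PySem.Chars.isspace c) then pvCnt pre false + 1 else pvCnt pre false)
              = pvCnt (pre ++ [c]) false := by
            rw [pvCnt_append]
            by_cases h1 : pvEnd pre false <;> by_cases h2 : PySem.Chars.isspace c <;> simp [h1, h2]
          have hprev : PySem.Chars.isspace c = !pvEnd (pre ++ [c]) false := by
            rw [pvEnd_append]; simp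
          have := ih p (pre ++ [c]) (by simpa using hp)
          simp only [pvScan, List.getD_cons_succ]
          rw [hlast, hprev, this]
          simp [List.take_succ_cons]

-- split₀.go counts acc plus the words of the remaining chunk
theorem pvSplit₀_go_length (s : List Char) : ∀ (cur : List Char) (acc : List (List Char)),
    (PySem.Chars.split₀.go s cur acc).length = acc.length + pvCnt s (!cur.isEmpty) := by
  induction s with
  | nil =>
      intro cur acc
      by_cases h : cur.isEmpty <;> simp [PySem.Chars.split₀.go, pvCnt, h]
  | cons c r ih =>
      intro cur acc
      by_cases hc : PySem.Chars.isspace c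
      · by_cases h : cur.isEmpty <;> (simp [PySem.Chars.split₀.go, pvCnt, hc, h, ih]; try omega)
      · simpa [PySem.Chars.split₀.go, pvCnt, hc] using ih (c :: cur) acc

theorem pvSplit₀_length (s : List Char) : (PySem.Chars.split₀ s).length = pvCnt s false := by
  simpa using pvSplit₀_go_length s [] []

-- bounds of findFrom for a nonnegative start
theorem pvFindFrom_bounds (t v : String) (st : Int) (h0 : 0 ≤ st)
    (h : PySem.Str.findFrom t v st ≠ -1) :
    st ≤ PySem.Str.findFrom t v st ∧ PySem.Str.findFrom t v st ≤ (t.toList.length : Int) := by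
  rw [PySem.Str.findFrom] at h ⊢
  unfold PySem.Chars.findFrom at h ⊢
  simp only [if_neg (not_lt.mpr h0), Int.toNat_natCast, List.take_length] at h ⊢
  by_cases hlt : ((t.toList.length : Int)) < st
  · rw [if_pos hlt] at h; exact absurd rfl h
  · simp only [if_neg hlt] at h ⊢
    by_cases hrm : PySem.Chars.find (List.drop st.toNat t.toList) v.toList = -1
    · rw [if_pos hrm] at h; exact absurd rfl h
    · simp only [if_neg hrm]
      have hr0 : 0 ≤ PySem.Chars.find (List.drop st.toNat t.toList) v.toList := by
        have := PySem.Chars.neg_one_le_find (List.drop st.toNat t.toList) v.toList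
        omega
      have hrle := PySem.Chars.find_le_length (List.drop st.toNat t.toList) v.toList
      have hlen : (List.drop st.toNat t.toList).length = t.toList.length - st.toNat :=
        List.length_drop
      have hst : (st.toNat : Int) = st := Int.toNat_of_nonneg h0
      rw [hlen] at hrle
      refine ⟨by omega, by omega⟩

-- A's token_start equals B's wc lookup, for match positions inside the text
theorem pvTokenStart_eq (tokenText : String) (pos : Int) (h0 : 0 ≤ pos)
    (hn : pos ≤ (tokenText.toList.length : Int)) :
    (PySem.Str.split₀ (PySem.Str.slice tokenText none (some pos))).length
      = PySem.List.pyGetD (pvB_wcGo tokenText.toList 0 true [0]) pos 0 := by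
  have hp : pos.toNat ≤ tokenText.toList.length := by omega
  have hscan := pvScan_getD tokenText.toList pos.toNat [] hp
  simp only [pvCnt, pvEnd, List.nil_append, Bool.not_false, if_neg Bool.false_ne_true] at hscan
  rw [PySem.List.pyGetD_of_nonneg _ _ h0, pvB_wcGo_eq]
  have htl : (PySem.Str.slice tokenText none (some pos)).toList = tokenText.toList.take pos.toNat := by
    simp [PySem.Str.slice, PySem.Chars.slice, PySem.List.slice_to _ h0]
  have hlen : (PySem.Str.split₀ (PySem.Str.slice tokenText none (some pos))).length
      = (PySem.Chars.split₀ (tokenText.toList.take pos.toNat)).length := by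
    have hmap := congrArg List.length
      (PySem.Str.split₀_map_toList (PySem.Str.slice tokenText none (some pos)))
    rw [List.length_map, htl] at hmap
    exact hmap
  rw [hlen, pvSplit₀_length, ← hscan]
  simp

-- updating labels never changes their length
theorem pvFoldl_pySetD_length (v : String) (rng : List Int) :
    ∀ (lb : List String),
    (rng.foldl (fun l i => PySem.List.pySetD l i v) lb).length = lb.length := by
  induction rng with
  | nil => intro lb; rfl
  | cons i r ih => intro lb; simp [List.foldl_cons, ih, PySem.List.length_pySetD]

theorem pvB_apply_length (labels : List String) (ts nvt : Nat) (field : String) :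
    (pvB_apply labels ts nvt field).length = labels.length := by
  unfold pvB_apply
  split
  · rw [pvFoldl_pySetD_length, PySem.List.length_pySetD]
  · rfl

-- the two loops agree on labels of the right length
set_option maxHeartbeats 1000000 in
theorem pvLoops_eq (tokenText valueText field : String) (nTokens nValueTokens : Nat) :
    ∀ (fuel : Nat) (labels : List String), labels.length = nTokens → ∀ (start : Int), 0 ≤ start →
    pvA_loop tokenText valueText nTokens nValueTokens field fuel labels start
      = pvB_loop tokenText valueText field (pvB_wcGo tokenText.toList 0 true [0]) nValueTokens
          fuel labels (PySem.Str.findFrom tokenText valueText start) := by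
  intro fuel
  induction fuel with
  | zero => intro labels _ start _; rfl
  | succ f ih =>
      intro labels hlen start hstart
      rw [pvA_loop, pvB_loop]
      by_cases hpos : PySem.Str.findFrom tokenText valueText start = -1
      · rw [if_pos hpos, if_pos hpos]
      · simp only [if_neg hpos]
        obtain ⟨hge, hle⟩ := pvFindFrom_bounds tokenText valueText start hstart hpos
        have h0' : 0 ≤ PySem.Str.findFrom tokenText valueText start := le_trans hstart hge
        have hts := pvTokenStart_eq tokenText (PySem.Str.findFrom tokenText valueText start) h0' hle
        have hupd :
            (if (PySem.Str.split₀ (PySem.Str.slice tokenText none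
                    (some (PySem.Str.findFrom tokenText valueText start)))).length < nTokens then
              let lb := PySem.List.pySetD labels
                (((PySem.Str.split₀ (PySem.Str.slice tokenText none
                    (some (PySem.Str.findFrom tokenText valueText start)))).length : Int)) ("B-" ++ field)
              (PySem.List.pyRange
                  (((PySem.Str.split₀ (PySem.Str.slice tokenText none
                      (some (PySem.Str.findFrom tokenText valueText start)))).length : Int) + 1)
                  ((min ((PySem.Str.split₀ (PySem.Str.slice tokenText none
                      (some (PySem.Str.findFrom tokenText valueText start)))).length + nValueTokens)
                    nTokens : Nat) : Int) 1).foldl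
                (fun l i => PySem.List.pySetD l i ("I-" ++ field)) lb
            else labels)
            = pvB_apply labels
                (PySem.List.pyGetD (pvB_wcGo tokenText.toList 0 true [0])
                  (PySem.Str.findFrom tokenText valueText start) 0) nValueTokens field := by
          rw [pvB_apply, ← hts, hlen]
        rw [hupd]
        exact ih _ (by rw [pvB_apply_length, hlen]) _ (by omega)

-- ===== VERDICT (by name: the statement is the Claim_ definition above) =====
set_option maxHeartbeats 1000000 in
theorem create_bio_labels_spec : Claim_equal_create_bio_labels := by
  intro tokens value field _
  unfold Spec_create_bio_labels
  simp only [create_bio_labels, create_bio_labels_alt]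
  have hff : PySem.Str.findFrom (PySem.Str.lower (PySem.Str.join " " tokens))
      (PySem.Str.lower (PySem.Str.join " " (PySem.Str.split₀ value))) 0
      = PySem.Str.find (PySem.Str.lower (PySem.Str.join " " tokens))
          (PySem.Str.lower (PySem.Str.join " " (PySem.Str.split₀ value))) := by
    rw [PySem.Str.findFrom, PySem.Str.find, PySem.Chars.findFrom_zero]
  rw [← hff]
  exact pvLoops_eq (PySem.Str.lower (PySem.Str.join " " tokens))
      (PySem.Str.lower (PySem.Str.join " " (PySem.Str.split₀ value))) field
      tokens.length (PySem.Str.split₀ value).length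
      ((PySem.Str.lower (PySem.Str.join " " tokens)).toList.length + 2)
      (List.replicate tokens.length "O") (by simp) 0 le_rfl
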